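-- pv_equiv track=rewrite | github.com/mbusc1/Python-Projects | q1solution/q1solution.py | by_party
-- ===== SOURCE A (Python) =====
-- def by_party(db : {int:{str:int}}) -> [str]:
--     parties = set()
--     for pr in db.values():
--         for p in pr.keys():
--             parties.add(p)
--
--     party_registration = {}
--     for p in parties:
--         registration = 0
--         for pr in db.values():
--             if p in pr:
--                 registration += pr[p]
--         party_registration[p] = registration
--     return sorted( party_registration.keys(), key = lambda p : (-party_registration[p],p) )
--     # or, in 1 line
--     return sorted ( {p for pr in db.values() for p in pr}, key = lambda p : (-sum((pr.get(p,0) for pr in db.values())),p))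
-- ===== SOURCE B (Python) =====
-- def by_party(db : {int:{str:int}}) -> [str]:
--     totals = {}
--     for pr in db.values():
--         for p, n in pr.items():
--             totals[p] = totals.get(p, 0) + n
--     return [p for p, _ in sorted(totals.items(), key=lambda it: (-it[1], it[0]))]
-- ===== Notes on version B (the rewrite author's own statement) =====
-- stated objective: faster
-- what changed: B makes one pass over all records accumulating each party's total in a dict (instead of collecting the party set and re-scanning every record for every party), then sorts the dict items once by (-count, name).
import Mathlib
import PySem

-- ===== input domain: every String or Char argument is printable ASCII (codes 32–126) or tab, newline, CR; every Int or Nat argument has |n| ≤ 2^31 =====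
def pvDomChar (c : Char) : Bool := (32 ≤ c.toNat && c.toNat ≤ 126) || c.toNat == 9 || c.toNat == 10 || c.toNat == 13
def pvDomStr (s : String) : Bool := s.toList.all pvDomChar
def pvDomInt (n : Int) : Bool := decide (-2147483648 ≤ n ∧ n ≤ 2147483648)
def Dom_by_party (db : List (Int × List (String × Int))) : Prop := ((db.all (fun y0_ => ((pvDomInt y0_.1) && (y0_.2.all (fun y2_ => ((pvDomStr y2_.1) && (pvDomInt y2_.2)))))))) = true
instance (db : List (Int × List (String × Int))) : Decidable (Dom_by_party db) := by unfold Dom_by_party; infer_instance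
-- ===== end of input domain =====

-- B replaces A's per-party rescan of every record by a single accumulating pass over the
-- records followed by one sort of the accumulated (party, total) items.

-- ===== PORT A =====
-- db and each inner record are Python dicts, modelled through PySem.Dict.ofList
-- (duplicate keys: last value wins, position of the first kept); 'pr[p]' is ported as
-- getD _ _ 0, exact because it is guarded by the 'p in pr' test.
def by_party (db : List (Int × List (String × Int))) : List String :=
  let vals := (PySem.Dict.ofList db).values
  let parties :=
    vals.foldl (fun s pr =>
      (PySem.Dict.ofList pr).keys.foldl (fun s p => PySem.Set.add s p) s) PySem.Set.empty
  let preg :=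
    parties.foldl (fun d p =>
      let registration :=
        vals.foldl (fun r pr =>
          if (PySem.Dict.ofList pr).contains p then r + (PySem.Dict.ofList pr).getD p 0
          else r) 0
      d.insert p registration) PySem.Dict.empty
  PySem.List.sorted2 preg.keys (fun p => -(preg.getD p 0)) (fun p => p)

-- ===== PORT B =====
def by_party_alt (db : List (Int × List (String × Int))) : List String :=
  let totals :=
    (PySem.Dict.ofList db).values.foldl (fun d pr =>
      (PySem.Dict.ofList pr).items.foldl
        (fun d it => d.insert it.1 (d.getD it.1 0 + it.2)) d) PySem.Dict.empty
  (PySem.List.sorted2 totals.items (fun it => -it.2) (fun it => it.1)).map (fun it => it.1)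

-- ===== PRECONDITION & SPEC =====
def Spec_by_party (db : List (Int × List (String × Int))) (out : List String) : Prop := out = by_party_alt db
instance (db : List (Int × List (String × Int))) (out : List String) : Decidable (Spec_by_party db out) := by unfold Spec_by_party; infer_instance

-- ===== CLAIM (what is proved, stated in full; the proofs are below) =====
def Claim_equal_by_party : Prop := ∀ (db : List (Int × List (String × Int))), Dom_by_party db → Spec_by_party db (by_party db)

-- ===== LEMMAS AND PROOFS =====

-- proof-side names for the two programs' intermediate values
def pvParties (vals : List (List (String × Int))) : PySem.Set String :=
  vals.foldl (fun s pr =>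
    (PySem.Dict.ofList pr).keys.foldl (fun s p => PySem.Set.add s p) s) PySem.Set.empty

def pvReg (vals : List (List (String × Int))) (p : String) : Int :=
  vals.foldl (fun r pr =>
    if (PySem.Dict.ofList pr).contains p then r + (PySem.Dict.ofList pr).getD p 0 else r) 0

def pvPreg (vals : List (List (String × Int))) : PySem.Dict String Int :=
  (pvParties vals).foldl (fun d p => d.insert p (pvReg vals p)) PySem.Dict.empty

def pvTot (vals : List (List (String × Int))) : PySem.Dict String Int :=
  vals.foldl (fun d pr =>
    (PySem.Dict.ofList pr).items.foldl
      (fun d it => d.insert it.1 (d.getD it.1 0 + it.2)) d) PySem.Dict.empty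

-- A's per-record step adds pr.getD p 0 unconditionally (getD is 0 when p is absent)
lemma regStep (d : PySem.Dict String Int) (r : Int) (p : String) :
    (if d.contains p then r + d.getD p 0 else r) = r + d.getD p 0 := by
  by_cases h : d.contains p = true
  · simp [h]
  · simp [eq_false_of_ne_true h,
      PySem.Dict.getD_of_not_contains d 0 (eq_false_of_ne_true h)]

lemma regval (vals : List (List (String × Int))) (p : String) :
    pvReg vals p = (vals.map (fun pr => (PySem.Dict.ofList pr).getD p 0)).sum := by
  rw [pvReg, PySem.List.foldl_congr_mem _ _
        (fun r pr => r + (PySem.Dict.ofList pr).getD p 0) _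
        (fun acc x _ => regStep _ _ _),
      PySem.List.foldl_add]
  simp

-- summing the values of the entries with key p in an assoc list with distinct keys = the lookup
lemma sum_filter_eq_find (l : List (String × Int)) (p : String)
    (hn : (l.map Prod.fst).Nodup) :
    ((l.filter (fun it => it.1 == p)).map Prod.snd).sum
      = (((l.find? (fun it => it.1 == p)).map Prod.snd).getD 0) := by
  induction l with
  | nil => simp
  | cons kv t ih =>
    simp only [List.map_cons, List.nodup_cons] at hn
    by_cases h : kv.1 = p
    · have ht : t.filter (fun it => it.1 == p) = [] := by
        apply List.filter_eq_nil_iff.mpr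
        intro it hit hbeq
        exact hn.1 (h ▸ (by simpa using hbeq) ▸ (List.mem_map_of_mem hit))
      simp [h, ht]
    · simp only [List.filter_cons, List.find?_cons]
      have : (kv.1 == p) = false := by simpa using h
      simp [this, ih hn.2]

-- hence the weighted sum over one record's items is its getD
lemma sumW_eq_getD (pr : List (String × Int)) (p : String) :
    (((PySem.Dict.ofList pr).items.filter (fun it => it.1 == p)).map Prod.snd).sum
      = (PySem.Dict.ofList pr).getD p 0 := by
  rw [sum_filter_eq_find _ _ (PySem.Dict.nodup_keys_ofList pr)]
  simp [PySem.Dict.getD, PySem.Dict.get?]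

-- B's inner loop: getD after accumulating a list of items
lemma getD_accum (l : List (String × Int)) (d : PySem.Dict String Int) (p : String) :
    (l.foldl (fun d it => d.insert it.1 (d.getD it.1 0 + it.2)) d).getD p 0
      = d.getD p 0 + ((l.filter (fun it => it.1 == p)).map Prod.snd).sum := by
  induction l generalizing d with
  | nil => simp
  | cons kv t ih =>
    simp only [List.foldl_cons, ih, PySem.Dict.getD_insert, List.filter_cons]
    by_cases h : p = kv.1
    · simp [h]; ring
    · have : (kv.1 == p) = false := by simpa using (Ne.symm h)
      simp [h, this]

-- B's outer loop: getD after accumulating all records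
lemma getD_totals (vals : List (List (String × Int))) (d : PySem.Dict String Int) (p : String) :
    (vals.foldl (fun d pr =>
        (PySem.Dict.ofList pr).items.foldl
          (fun d it => d.insert it.1 (d.getD it.1 0 + it.2)) d) d).getD p 0
      = d.getD p 0 + (vals.map (fun pr => (PySem.Dict.ofList pr).getD p 0)).sum := by
  induction vals generalizing d with
  | nil => simp
  | cons pr t ih =>
    simp only [List.foldl_cons, ih, getD_accum, sumW_eq_getD, List.map_cons, List.sum_cons]
    ring

-- B's keys form the same first-occurrence Set.update chain as A's parties loop
lemma keys_totals (vals : List (List (String × Int))) (d : PySem.Dict String Int) :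
    (vals.foldl (fun d pr =>
        (PySem.Dict.ofList pr).items.foldl
          (fun d it => d.insert it.1 (d.getD it.1 0 + it.2)) d) d).keys
      = vals.foldl (fun s pr => PySem.Set.update s (PySem.Dict.ofList pr).keys) d.keys := by
  induction vals generalizing d with
  | nil => rfl
  | cons pr t ih =>
    simp only [List.foldl_cons, ih, PySem.Dict.keys_foldl_insert_key]
    rfl

lemma nodup_keys_totals (vals : List (List (String × Int))) (d : PySem.Dict String Int)
    (h : d.keys.Nodup) :
    (vals.foldl (fun d pr =>
        (PySem.Dict.ofList pr).items.foldl
          (fun d it => d.insert it.1 (d.getD it.1 0 + it.2)) d) d).keys.Nodup := by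
  induction vals generalizing d with
  | nil => exact h
  | cons pr t ih =>
    exact ih _ (PySem.Dict.nodup_keys_foldl_insert_key _ _ _ _ h)

-- A's parties loop written as the Set.update chain
lemma parties_eq_updates (vals : List (List (String × Int))) (s : PySem.Set String) :
    vals.foldl (fun s pr =>
        (PySem.Dict.ofList pr).keys.foldl (fun s p => PySem.Set.add s p) s) s
      = vals.foldl (fun s pr => PySem.Set.update s (PySem.Dict.ofList pr).keys) s := by
  rfl

lemma nodup_parties (vals : List (List (String × Int))) (s : PySem.Set String)
    (h : s.Nodup) :
    (vals.foldl (fun s pr => PySem.Set.update s (PySem.Dict.ofList pr).keys) s).Nodup := by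
  induction vals generalizing s with
  | nil => exact h
  | cons pr t ih => exact ih _ (PySem.Set.nodup_update _ _ h)

-- mapping fst over an insertBy whose test only reads the fst-images
lemma map_fst_insertBy (bf : (String × Int) → (String × Int) → Bool)
    (bg : String → String → Bool) (x : String × Int) (ys : List (String × Int))
    (h : ∀ y ∈ ys, bf x y = bg x.1 y.1) :
    (PySem.List.insertBy bf x ys).map Prod.fst
      = PySem.List.insertBy bg x.1 (ys.map Prod.fst) := by
  induction ys with
  | nil => rfl
  | cons y t ih =>
    simp only [PySem.List.insertBy, List.map_cons]
    rw [h y (List.mem_cons_self)]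
    by_cases hb : bg x.1 y.1 = true
    · simp [hb]
    · simp only [eq_false_of_ne_true hb]
      rw [← ih (fun y hy => h y (List.mem_cons_of_mem _ hy))]
      rfl

lemma map_fst_foldl_insertBy (bf : (String × Int) → (String × Int) → Bool)
    (bg : String → String → Bool) (xs acc : List (String × Int))
    (h : ∀ x, (x ∈ xs ∨ x ∈ acc) → ∀ y, (y ∈ xs ∨ y ∈ acc) → bf x y = bg x.1 y.1) :
    (xs.foldl (fun acc x => PySem.List.insertBy bf x acc) acc).map Prod.fst
      = (xs.map Prod.fst).foldl (fun acc y => PySem.List.insertBy bg y acc) (acc.map Prod.fst) := by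
  induction xs generalizing acc with
  | nil => rfl
  | cons x t ih =>
    simp only [List.foldl_cons, List.map_cons]
    rw [← map_fst_insertBy bf bg x acc
      (fun y hy => h x (Or.inl List.mem_cons_self) y (Or.inr hy))]
    exact ih _ (fun a ha b hb => by
      apply h
      · rcases ha with ha | ha
        · exact Or.inl (List.mem_cons_of_mem _ ha)
        · rcases (PySem.List.mem_insertBy _ _ _ _).1 ha with rfl | ha'
          · exact Or.inl List.mem_cons_self
          · exact Or.inr ha'
      · rcases hb with hb | hb
        · exact Or.inl (List.mem_cons_of_mem _ hb)
        · rcases (PySem.List.mem_insertBy _ _ _ _).1 hb with rfl | hb'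
          · exact Or.inl List.mem_cons_self
          · exact Or.inr hb')

lemma sorted2_eq {α κ₁ κ₂ : Type} [LT κ₁] [DecidableLT κ₁] [LT κ₂] [DecidableLT κ₂]
    (xs : List α) (k1 : α → κ₁) (k2 : α → κ₂) :
    PySem.List.sorted2 xs k1 k2
      = xs.foldl (fun acc x => PySem.List.insertBy
          (fun a b => decide (k1 a < k1 b) || (!decide (k1 b < k1 a) && decide (k2 a < k2 b)))
          x acc) [] := rfl

lemma main_eq (vals : List (List (String × Int))) :
    PySem.List.sorted2 (pvPreg vals).keys
        (fun p => -((pvPreg vals).getD p 0)) (fun p => p)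
      = (PySem.List.sorted2 (pvTot vals).items
          (fun it => -it.2) (fun it => it.1)).map Prod.fst := by
  have hpn : (pvParties vals).Nodup := by
    rw [pvParties, parties_eq_updates]
    exact nodup_parties _ _ List.nodup_nil
  have hitems : (pvPreg vals).items = (pvParties vals).map (fun p => (p, pvReg vals p)) := by
    rw [pvPreg, PySem.Dict.items_foldl_insert_fresh _ (fun p => p) (pvReg vals) _
      (fun a _ => rfl) (by simpa using hpn)]
    rfl
  have hkeys : (pvPreg vals).keys = pvParties vals := by
    simp [PySem.Dict.keys, hitems, Function.comp_def]
  have hknd : (pvPreg vals).keys.Nodup := hkeys ▸ hpn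
  have htnd : (pvTot vals).keys.Nodup := nodup_keys_totals _ _ (by exact List.nodup_nil)
  have htk : (pvTot vals).keys = pvParties vals := by
    rw [pvTot, keys_totals, pvParties, parties_eq_updates]
    rfl
  have htitems : (pvTot vals).items = (pvParties vals).map (fun p => (p, pvReg vals p)) := by
    rw [PySem.Dict.items_eq_map_keys _ htnd 0, htk]
    refine List.map_congr_left ?_
    intro p hp
    rw [pvTot, getD_totals, regval]
    simp [PySem.Dict.getD_empty]
  have hip : (pvTot vals).items = (pvPreg vals).items := by rw [htitems, hitems]
  have hgd : ∀ x ∈ (pvTot vals).items, (pvPreg vals).getD x.1 0 = x.2 := by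
    intro x hx
    rw [hip] at hx
    exact PySem.Dict.getD_of_mem_items _ (by simpa using hx) hknd 0
  have hmap := map_fst_foldl_insertBy
      (fun a b => decide (-a.2 < -b.2) || (!decide (-b.2 < -a.2) && decide (a.1 < b.1)))
      (fun p q => decide (-((pvPreg vals).getD p 0) < -((pvPreg vals).getD q 0))
        || (!decide (-((pvPreg vals).getD q 0) < -((pvPreg vals).getD p 0)) && decide (p < q)))
      (pvTot vals).items []
      (by
        intro x hx y hy
        rcases hx with hx | hx
        · rcases hy with hy | hy
          · simp only [hgd x hx, hgd y hy]
          · simp at hy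
        · simp at hx)
  simp only [sorted2_eq]
  rw [hmap, hip]
  rfl

-- ===== VERDICT (by name: the statement is the Claim_ definition above) =====
theorem by_party_spec : Claim_equal_by_party := by
  intro db _
  show by_party db = by_party_alt db
  exact main_eq ((PySem.Dict.ofList db).values)
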